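-- pv_equiv track=rewrite | github.com/michaelschrijver/1kb-project | palette.py | bit_writer
-- ===== SOURCE A (Python) =====
-- def bit_writer(g):
--     g = iter(g)
--     while True:
--         try:
--             val = next(g)
--         except StopIteration:
--             break
--         try:
--             val |= next(g) << 2
--             val |= next(g) << 4
--             val |= next(g) << 6
--         except StopIteration:
--             yield val
--             break
--         else:
--             yield val
-- ===== SOURCE B (Python) =====
-- def bit_writer(g):
--     val = 0
--     count = 0
--     for x in g:
--         val |= x << (2 * count)
--         count += 1
--         if count == 4:
--             yield val
--             val = 0
--             count = 0
--     if count: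
--         yield val
-- ===== Notes on version B (the rewrite author's own statement) =====
-- stated objective: simpler
-- what changed: Replaces the hand-unrolled next()/StopIteration protocol with one for-loop maintaining an accumulator and position counter, yielding and resetting every fourth element and flushing the partial group after the loop.
import Mathlib
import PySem

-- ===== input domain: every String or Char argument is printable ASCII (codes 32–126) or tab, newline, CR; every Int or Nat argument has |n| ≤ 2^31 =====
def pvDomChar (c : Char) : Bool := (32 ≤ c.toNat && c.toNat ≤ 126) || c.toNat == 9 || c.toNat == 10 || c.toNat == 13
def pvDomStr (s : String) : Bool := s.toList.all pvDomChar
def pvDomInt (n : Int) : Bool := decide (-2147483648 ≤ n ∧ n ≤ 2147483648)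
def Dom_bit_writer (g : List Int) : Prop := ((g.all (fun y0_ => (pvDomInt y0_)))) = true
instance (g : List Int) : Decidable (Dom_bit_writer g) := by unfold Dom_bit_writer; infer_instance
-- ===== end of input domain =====

-- B replaces A's hand-unrolled next()/StopIteration group packing with a single
-- accumulator/counter loop (objective: simpler). Return-value equivalence only (A is a generator).
-- ===== PORT A =====
-- transliteration of A: each loop iteration tries to pull four elements, ORing in
-- shifted values; a StopIteration inside the group yields the partial val and breaks.
def bit_writer (g : List Int) : List Int :=
  match g with
  | [] => []
  | [a] => [a]
  | [a, b] => [PySem.Int.bor a (b <<< (2 : Nat))]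
  | [a, b, c] => [PySem.Int.bor (PySem.Int.bor a (b <<< (2 : Nat))) (c <<< (4 : Nat))]
  | a :: b :: c :: d :: rest =>
      (PySem.Int.bor (PySem.Int.bor (PySem.Int.bor a (b <<< (2 : Nat))) (c <<< (4 : Nat))) (d <<< (6 : Nat)))
        :: bit_writer rest

-- ===== PORT B =====
-- transliteration of Source B: for-loop over g with state (emitted output, val, count);
-- after the loop, flush the partial group if count ≠ 0.
def bwLoop (g : List Int) (out : List Int) (val : Int) (count : Nat) : List Int :=
  match g with
  | [] => if count ≠ 0 then out ++ [val] else out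
  | x :: xs =>
      let val' := PySem.Int.bor val (x <<< (2 * count))
      let count' := count + 1
      if count' == 4 then bwLoop xs (out ++ [val']) 0 0
      else bwLoop xs out val' count'

def bit_writer_alt (g : List Int) : List Int := bwLoop g [] 0 0

-- ===== PRECONDITION & SPEC =====
def Spec_bit_writer (g : List Int) (out : List Int) : Prop := out = bit_writer_alt g
instance (g : List Int) (out : List Int) : Decidable (Spec_bit_writer g out) := by unfold Spec_bit_writer; infer_instance

-- ===== CLAIM (what is proved, stated in full; the proofs are below) =====
def Claim_equal_bit_writer : Prop := ∀ (g : List Int), Dom_bit_writer g → Spec_bit_writer g (bit_writer g)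

-- ===== LEMMAS AND PROOFS =====

-- ===== VERDICT (by name: the statement is the Claim_ definition above) =====
theorem bwLoop_zero (g : List Int) (out : List Int) :
    bwLoop g out 0 0 = out ++ bit_writer g := by
  fun_induction bit_writer g generalizing out with
  | case1 => simp [bwLoop]
  | case2 a => simp [bwLoop, PySem.Int.bor_comm]
  | case3 a b => simp only [bwLoop, PySem.Int.bor_comm 0]; norm_num
  | case4 a b c => simp only [bwLoop, PySem.Int.bor_comm 0]; norm_num
  | case5 a b c d rest ih =>
      simp only [bwLoop, PySem.Int.bor_comm 0, ih]; norm_num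

theorem bit_writer_spec : Claim_equal_bit_writer := by
  intro g _
  unfold Spec_bit_writer bit_writer_alt
  simp [bwLoop_zero]
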